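-- pv_equiv track=rewrite | github.com/wananer/pp-Evolution-World-Assistant | plugins/world_evolution_core/host_context.py | _terms
-- ===== SOURCE A (Python) =====
-- from typing import Any
--
-- def _terms(query: str) -> list[str]:
--     terms = []
--     current = []
--     for char in str(query or ""):
--         if "\u4e00" <= char <= "\u9fff" or char.isalnum():
--             current.append(char)
--             continue
--         if len(current) >= 2:
--             terms.append("".join(current))
--         current = []
--     if len(current) >= 2:
--         terms.append("".join(current))
--     return _dedupe([term[-12:] for term in terms if len(term) <= 24])
--
-- def _dedupe(items: list[Any]) -> list[str]:
--     seen = set()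
--     result = []
--     for item in items:
--         value = str(item or "").strip()
--         if not value or value in seen:
--             continue
--         seen.add(value)
--         result.append(value)
--     return result
-- ===== SOURCE B (Python) =====
-- def _terms(query: str) -> list[str]:
--     s = str(query or "")
--     cleaned = "".join(c if ("\u4e00" <= c <= "\u9fff" or c.isalnum()) else " " for c in s)
--     out = []
--     seen = set()
--     for word in cleaned.split():
--         if 2 <= len(word) <= 24:
--             token = word[-12:]
--             if token not in seen:
--                 seen.add(token)
--                 out.append(token)
--     return out
-- ===== Notes on version B (the rewrite author's own statement) =====
-- stated objective: idiomatic
-- what changed: Replaces the manual per-character state machine plus separate _dedupe helper by translating non-word characters to spaces, splitting with str.split(), and a single fused filter/truncate/dedupe pass.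
import Mathlib
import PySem

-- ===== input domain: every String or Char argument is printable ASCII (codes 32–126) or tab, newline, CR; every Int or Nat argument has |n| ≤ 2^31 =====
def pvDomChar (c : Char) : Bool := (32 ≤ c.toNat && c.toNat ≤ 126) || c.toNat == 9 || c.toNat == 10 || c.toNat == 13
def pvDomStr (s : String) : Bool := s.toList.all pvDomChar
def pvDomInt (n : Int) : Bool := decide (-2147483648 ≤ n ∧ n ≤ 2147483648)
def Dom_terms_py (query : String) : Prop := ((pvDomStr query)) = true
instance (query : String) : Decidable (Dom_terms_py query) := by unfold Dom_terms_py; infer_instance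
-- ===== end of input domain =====

-- B replaces A's per-character state machine + separate _dedupe helper by a translate-to-spaces /
-- str.split() decomposition with one fused filter/truncate/dedupe pass (idiomatic; same cost).

-- ===== PORT A =====
-- shared helper: the character predicate '"\u4e00" <= char <= "\u9fff" or char.isalnum()'
def pvWordy (c : Char) : Bool := (decide ('\u4e00' ≤ c) && decide (c ≤ '\u9fff')) || PySem.Chars.isalnum c

-- the 'for char in …' loop of _terms, including the trailing 'if len(current) >= 2' flush
def pvGoA : List Char → List (List Char) → List Char → List (List Char)
  | [], terms, current => if 2 ≤ current.length then terms ++ [current] else terms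
  | c :: rest, terms, current =>
    if pvWordy c then pvGoA rest terms (current ++ [c])
    else pvGoA rest (if 2 ≤ current.length then terms ++ [current] else terms) []

-- the loop of _dedupe  (str(item or "") is the identity on str, kept as such)
def pvDedupeA : List (List Char) → PySem.Set (List Char) → List (List Char) → List (List Char)
  | [], _, result => result
  | item :: rest, seen, result =>
    let value := PySem.Chars.strip item
    if value.isEmpty || PySem.Set.contains seen value then pvDedupeA rest seen result
    else pvDedupeA rest (PySem.Set.add seen value) (result ++ [value])

def terms_py (query : String) : List String :=
  let terms := pvGoA query.toList [] []
  let items := (terms.filter (fun t => decide (t.length ≤ 24))).map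
      (fun t => PySem.List.slice t (some (-12)) none)
  (pvDedupeA items [] []).map String.ofList

-- ===== PORT B =====
-- B's single fused loop over the words of the cleaned string
def pvGoB : List (List Char) → PySem.Set (List Char) → List (List Char) → List (List Char)
  | [], _, out => out
  | w :: rest, seen, out =>
    if 2 ≤ w.length ∧ w.length ≤ 24 then
      let token := PySem.List.slice w (some (-12)) none
      if PySem.Set.contains seen token then pvGoB rest seen out
      else pvGoB rest (PySem.Set.add seen token) (out ++ [token])
    else pvGoB rest seen out

def terms_py_alt (query : String) : List String :=
  let cleaned := query.toList.map (fun c => if pvWordy c then c else ' ')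
  (pvGoB (PySem.Chars.split₀ cleaned) [] []).map String.ofList

-- ===== PRECONDITION & SPEC =====
def Spec_terms_py (query : String) (out : List String) : Prop := out = terms_py_alt query
instance (query : String) (out : List String) : Decidable (Spec_terms_py query out) := by unfold Spec_terms_py; infer_instance

-- ===== CLAIM (what is proved, stated in full; the proofs are below) =====
def Claim_equal_terms_py : Prop := ∀ (query : String), Dom_terms_py query → Spec_terms_py query (terms_py query)

-- ===== LEMMAS AND PROOFS =====

-- the total-state run decomposition both machines compute
def pvRunsC : List Char → List Char → List (List Char)
  | cur, [] => [cur]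
  | cur, c :: rest => if pvWordy c then pvRunsC (cur ++ [c]) rest else cur :: pvRunsC [] rest

lemma pvWordy_not_space (c : Char) (h : pvWordy c = true) : PySem.Chars.isspace c = false := by
  have hle : ∀ a b : Char, (a ≤ b) ↔ (a.toNat ≤ b.toNat) := by
    intro a b; rw [Char.le_def, UInt32.le_iff_toNat_le]; rfl
  unfold pvWordy PySem.Chars.isalnum PySem.Chars.isalpha PySem.Chars.isdigit PySem.Chars.isupper PySem.Chars.islower at h
  unfold PySem.Chars.isspace
  simp only [Bool.or_eq_true, Bool.and_eq_true, decide_eq_true_eq, hle] at h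
  simp only [Bool.or_eq_false_iff, Bool.and_eq_false_iff, decide_eq_false_iff_not]
  have e1 : ('\u4e00').toNat = 19968 := rfl
  have e2 : ('\u9fff').toNat = 40959 := rfl
  have e3 : ('A').toNat = 65 := rfl
  have e4 : ('Z').toNat = 90 := rfl
  have e5 : ('a').toNat = 97 := rfl
  have e6 : ('z').toNat = 122 := rfl
  have e7 : ('0').toNat = 48 := rfl
  have e8 : ('9').toNat = 57 := rfl
  rw [e1, e2, e3, e4, e5, e6, e7, e8] at h
  omega

lemma pvStrip_of_all_wordy (l : List Char) (h : ∀ c ∈ l, pvWordy c = true) :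
    PySem.Chars.strip l = l := by
  have hns : ∀ c ∈ l, PySem.Chars.isspace c = false := fun c hc => pvWordy_not_space c (h c hc)
  unfold PySem.Chars.strip PySem.Chars.lstrip PySem.Chars.rstrip
  rw [List.dropWhile_eq_self_iff.mpr, List.dropWhile_eq_self_iff.mpr, List.reverse_reverse]
  · intro hne
    have hm : l[0] ∈ l := List.getElem_mem hne
    simp [hns _ hm]
  · intro hne
    have hm : ∀ (i : Nat) (hi : i < (List.dropWhile PySem.Chars.isspace l).length),
        PySem.Chars.isspace (List.dropWhile PySem.Chars.isspace l)[i] = false := fun i hi =>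
      hns _ ((List.dropWhile_sublist _).subset (List.getElem_mem hi))
    simp [hm]

lemma pvGoA_eq (s : List Char) : ∀ terms cur,
    pvGoA s terms cur = terms ++ (pvRunsC cur s).filter (fun r => decide (2 ≤ r.length)) := by
  induction s with
  | nil => intro terms cur; by_cases h : 2 ≤ cur.length <;> simp [pvGoA, pvRunsC, List.filter, h]
  | cons c rest ih =>
    intro terms cur
    by_cases hw : pvWordy c
    · simp [pvGoA, pvRunsC, hw, ih]
    · by_cases h2 : 2 ≤ cur.length <;>
        simp [pvGoA, pvRunsC, hw, h2, ih]

lemma pvSplit_eq (s : List Char) : ∀ cur acc,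
    PySem.Chars.split₀.go (s.map (fun c => if pvWordy c then c else ' ')) cur acc
      = acc.reverse ++ (pvRunsC cur.reverse s).filter (fun r => !r.isEmpty) := by
  induction s with
  | nil =>
    intro cur acc
    by_cases h : cur.isEmpty <;>
      simp_all [PySem.Chars.split₀.go, pvRunsC, List.filter, List.isEmpty_iff]
  | cons c rest ih =>
    intro cur acc
    by_cases hw : pvWordy c
    · have hns := pvWordy_not_space c hw
      simp [PySem.Chars.split₀.go, hw, hns, pvRunsC, ih, List.reverse_cons]
    · have hsp : PySem.Chars.isspace ' ' = true := by decide
      by_cases he : cur.isEmpty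
      · have : cur = [] := by simpa [List.isEmpty_iff] using he
        subst this
        simp [PySem.Chars.split₀.go, hw, hsp, pvRunsC, ih]
      · have hne : cur.reverse.isEmpty = false := by
          simp_all [List.isEmpty_iff]
        simp [PySem.Chars.split₀.go, hw, hsp, he, pvRunsC, ih, hne]

lemma pvRunsC_all_wordy (s : List Char) : ∀ cur, (∀ c ∈ cur, pvWordy c = true) →
    ∀ r ∈ pvRunsC cur s, ∀ c ∈ r, pvWordy c = true := by
  induction s with
  | nil => intro cur hcur r hr; simp [pvRunsC] at hr; subst hr; exact hcur
  | cons c rest ih =>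
    intro cur hcur r hr
    by_cases hw : pvWordy c
    · refine ih (cur ++ [c]) ?_ r (by simpa [pvRunsC, hw] using hr)
      intro d hd
      rcases List.mem_append.mp hd with h | h
      · exact hcur d h
      · simp at h; subst h; exact hw
    · simp [pvRunsC, hw] at hr
      rcases hr with h | h
      · subst h; exact hcur
      · exact ih [] (by simp) r h

lemma pvGoB_filter_empty (W : List (List Char)) : ∀ seen out,
    pvGoB (W.filter (fun r => !r.isEmpty)) seen out = pvGoB W seen out := by
  induction W with
  | nil => intro seen out; rfl
  | cons w rest ih =>
    intro seen out
    by_cases he : w.isEmpty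
    · have hw : w = [] := by simpa [List.isEmpty_iff] using he
      subst hw
      simp [pvGoB, ih]
    · by_cases hlen : 2 ≤ w.length ∧ w.length ≤ 24 <;>
        simp [he, pvGoB, hlen, ih]

lemma pvFuse (W : List (List Char)) (hW : ∀ r ∈ W, ∀ c ∈ r, pvWordy c = true) :
    ∀ seen out,
    pvDedupeA (((W.filter (fun r => decide (2 ≤ r.length))).filter
        (fun t => decide (t.length ≤ 24))).map (fun t => PySem.List.slice t (some (-12)) none))
        seen out = pvGoB W seen out := by
  induction W with
  | nil => intro seen out; rfl
  | cons w rest ih =>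
    intro seen out
    have hW' : ∀ r ∈ rest, ∀ c ∈ r, pvWordy c = true := fun r hr => hW r (List.mem_cons_of_mem _ hr)
    by_cases h2 : 2 ≤ w.length
    · by_cases h24 : w.length ≤ 24
      · have hcond : 2 ≤ w.length ∧ w.length ≤ 24 := ⟨h2, h24⟩
        have hslice : PySem.List.slice w (some (-12)) none = w.drop (w.length - 12) :=
          PySem.List.slice_from_neg_ofNat w 12 (by omega)
        have htokw : ∀ c ∈ PySem.List.slice w (some (-12)) none, pvWordy c = true := by
          intro c hc
          rw [hslice] at hc
          exact hW w List.mem_cons_self c (List.mem_of_mem_drop hc)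
        have hstrip : PySem.Chars.strip (PySem.List.slice w (some (-12)) none)
            = PySem.List.slice w (some (-12)) none := pvStrip_of_all_wordy _ htokw
        have hne : (PySem.List.slice w (some (-12)) none).isEmpty = false := by
          rw [hslice]
          simp only [List.isEmpty_eq_false_iff, ne_eq, List.drop_eq_nil_iff]
          omega
        rw [List.filter_cons_of_pos (by simpa using h2),
          List.filter_cons_of_pos (by simpa using h24), List.map_cons]
        simp only [pvDedupeA, pvGoB, if_pos hcond, hstrip, hne, Bool.false_or]
        by_cases hseen : PySem.Set.contains seen (PySem.List.slice w (some (-12)) none) = true <;>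
          simp only [hseen, if_true, ih hW']
      · rw [List.filter_cons_of_pos (by simpa using h2),
          List.filter_cons_of_neg (by simpa using h24)]
        simp only [pvGoB, if_neg (fun h : _ ∧ _ => h24 h.2)]
        exact ih hW' seen out
    · rw [List.filter_cons_of_neg (by simpa using h2)]
      simp only [pvGoB, if_neg (fun h : _ ∧ _ => h2 h.1)]
      exact ih hW' seen out

-- ===== VERDICT (by name: the statement is the Claim_ definition above) =====
theorem terms_py_spec : Claim_equal_terms_py := by
  intro query _
  simp only [Spec_terms_py, terms_py, terms_py_alt, PySem.Chars.split₀]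
  rw [pvGoA_eq, pvSplit_eq]
  simp only [List.nil_append, List.reverse_nil]
  rw [pvGoB_filter_empty]
  rw [pvFuse _ (pvRunsC_all_wordy query.toList [] (by simp))]
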